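-- pv_equiv track=rewrite | github.com/leosoftlima/nl2spec | core/convert/nl/event_nl.py | _render_violation
-- ===== SOURCE A (Python) =====
-- from typing import Dict, List, Any
--
-- def _render_violation(violation: Dict[str, Any]) -> str:
--     body = violation.get("body", {})
--     statements = body.get("statements", [])
--
--     messages = []
--
--     for statement in statements:
--         if statement.get("type") == "log":
--             message = statement.get("message", "").strip()
--             if message:
--                 messages.append(message)
--
--     if not messages:
--         return "__DEFAULT_MESSAGE"
--
--     non_default = [msg for msg in messages if msg != "__DEFAULT_MESSAGE"]
--     if non_default:
--         return non_default[-1]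
--
--     return messages[-1]
-- ===== SOURCE B (Python) =====
-- from typing import Dict, Any
--
-- def _render_violation(violation: Dict[str, Any]) -> str:
--     for statement in reversed(violation.get("body", {}).get("statements", [])):
--         if statement.get("type") == "log":
--             message = statement.get("message", "").strip()
--             if message and message != "__DEFAULT_MESSAGE":
--                 return message
--     return "__DEFAULT_MESSAGE"
-- ===== Notes on version B (the rewrite author's own statement) =====
-- stated objective: simpler
-- what changed: Replaces the forward collect-all-messages pass plus two filtering passes with a single backward scan that returns the first non-empty, non-default log message and falls through to the default otherwise.
import Mathlib
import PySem

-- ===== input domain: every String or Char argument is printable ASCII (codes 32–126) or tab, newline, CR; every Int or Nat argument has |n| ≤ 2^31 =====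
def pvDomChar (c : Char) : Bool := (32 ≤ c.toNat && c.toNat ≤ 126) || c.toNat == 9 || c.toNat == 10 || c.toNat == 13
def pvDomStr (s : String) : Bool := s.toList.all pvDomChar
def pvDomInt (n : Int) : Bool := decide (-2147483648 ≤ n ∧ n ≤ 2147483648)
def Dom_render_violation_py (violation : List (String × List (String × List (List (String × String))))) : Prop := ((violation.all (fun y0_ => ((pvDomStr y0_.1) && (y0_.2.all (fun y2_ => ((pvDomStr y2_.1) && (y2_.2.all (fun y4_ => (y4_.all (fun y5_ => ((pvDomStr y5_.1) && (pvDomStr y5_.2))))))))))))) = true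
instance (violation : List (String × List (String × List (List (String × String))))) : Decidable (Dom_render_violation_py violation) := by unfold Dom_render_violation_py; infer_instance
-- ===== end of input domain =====

-- B replaces A's forward collect-then-filter-twice structure by a single backward scan
-- returning the first non-empty non-default log message (objective: simpler).

-- ===== PORT A =====
def render_violation_py (violation : List (String × List (String × List (List (String × String))))) : String :=
  let body := (PySem.Dict.mk violation).getD "body" []
  let statements := (PySem.Dict.mk body).getD "statements" []
  let messages := statements.foldl (fun acc statement =>
    if (PySem.Dict.mk statement).get? "type" = some "log" then
      let message := PySem.Str.strip ((PySem.Dict.mk statement).getD "message" "")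
      if message ≠ "" then acc ++ [message] else acc
    else acc) ([] : List String)
  if messages = [] then "__DEFAULT_MESSAGE"
  else
    let non_default := messages.filter (fun msg => msg ≠ "__DEFAULT_MESSAGE")
    if non_default ≠ [] then (PySem.List.pyGet? non_default (-1)).getD ""
    else (PySem.List.pyGet? messages (-1)).getD ""

-- ===== PORT B =====
-- the 'for statement in reversed(statements)' loop of Source B, with its early return
def rvAltLoop : List (List (String × String)) → String
  | [] => "__DEFAULT_MESSAGE"
  | statement :: rest =>
    if (PySem.Dict.mk statement).get? "type" = some "log" then
      let message := PySem.Str.strip ((PySem.Dict.mk statement).getD "message" "")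
      if message ≠ "" ∧ message ≠ "__DEFAULT_MESSAGE" then message else rvAltLoop rest
    else rvAltLoop rest

def render_violation_py_alt (violation : List (String × List (String × List (List (String × String))))) : String :=
  rvAltLoop (((PySem.Dict.mk ((PySem.Dict.mk violation).getD "body" [])).getD "statements" []).reverse)

-- ===== PRECONDITION & SPEC =====
def Spec_render_violation_py (violation : List (String × List (String × List (List (String × String))))) (out : String) : Prop := out = render_violation_py_alt violation
instance (violation : List (String × List (String × List (List (String × String))))) (out : String) : Decidable (Spec_render_violation_py violation out) := by unfold Spec_render_violation_py; infer_instance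

-- ===== CLAIM (what is proved, stated in full; the proofs are below) =====
def Claim_equal_render_violation_py : Prop := ∀ (violation : List (String × List (String × List (List (String × String))))), Dom_render_violation_py violation → Spec_render_violation_py violation (render_violation_py violation)

-- ===== LEMMAS AND PROOFS =====

/-- message extracted from one statement (if it contributes one) -/
def rvMsg (statement : List (String × String)) : Option String :=
  if (PySem.Dict.mk statement).get? "type" = some "log" then
    let message := PySem.Str.strip ((PySem.Dict.mk statement).getD "message" "")
    if message ≠ "" then some message else none
  else none

theorem rvFoldl_eq_filterMap (sts : List (List (String × String))) (acc : List String) :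
    sts.foldl (fun acc statement =>
      if (PySem.Dict.mk statement).get? "type" = some "log" then
        let message := PySem.Str.strip ((PySem.Dict.mk statement).getD "message" "")
        if message ≠ "" then acc ++ [message] else acc
      else acc) acc = acc ++ sts.filterMap rvMsg := by
  induction sts generalizing acc with
  | nil => simp
  | cons s rest ih =>
    simp only [List.foldl_cons, List.filterMap_cons, rvMsg]
    split_ifs with h1 h2
    · rw [ih, List.append_assoc]; rfl
    · rw [ih]; rfl
    · rw [ih]; rfl

theorem rvAltLoop_eq_find (L : List (List (String × String))) :
    rvAltLoop L = ((L.filterMap rvMsg).find? (fun m => m ≠ "__DEFAULT_MESSAGE")).getD "__DEFAULT_MESSAGE" := by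
  induction L with
  | nil => simp [rvAltLoop]
  | cons s rest ih =>
    rw [List.filterMap_cons]
    by_cases h1 : (PySem.Dict.mk s).get? "type" = some "log"
    · by_cases hne : PySem.Str.strip ((PySem.Dict.mk s).getD "message" "") = ""
      · have hg : rvMsg s = none := by simp [rvMsg, h1, hne]
        rw [hg]
        simp [rvAltLoop, h1, hne, ih]
      · have hg : rvMsg s = some (PySem.Str.strip ((PySem.Dict.mk s).getD "message" "")) := by
          simp [rvMsg, h1, hne]
        rw [hg]
        by_cases hd : PySem.Str.strip ((PySem.Dict.mk s).getD "message" "") = "__DEFAULT_MESSAGE"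
        · simp [rvAltLoop, h1, hd, ih]
        · simp [rvAltLoop, h1, hne, hd]
    · have hg : rvMsg s = none := by simp [rvMsg, h1]
      rw [hg]
      simp [rvAltLoop, h1, ih]

/-- the heart: A's collect-then-filter-twice postprocessing equals the backward find. -/
theorem rvPost_eq (msgs : List String) :
    (if msgs = [] then "__DEFAULT_MESSAGE"
     else if msgs.filter (fun msg => decide (msg ≠ "__DEFAULT_MESSAGE")) ≠ [] then
       (PySem.List.pyGet? (msgs.filter (fun msg => decide (msg ≠ "__DEFAULT_MESSAGE"))) (-1)).getD ""
     else (PySem.List.pyGet? msgs (-1)).getD "")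
    = ((msgs.reverse.find? (fun m => decide (m ≠ "__DEFAULT_MESSAGE"))).getD "__DEFAULT_MESSAGE") := by
  induction msgs using List.reverseRecOn with
  | nil => simp
  | append_singleton ms m ih =>
    by_cases hm : m = "__DEFAULT_MESSAGE"
    · subst hm
      have hfil : (ms ++ ["__DEFAULT_MESSAGE"]).filter (fun msg => decide (msg ≠ "__DEFAULT_MESSAGE"))
          = ms.filter (fun msg => decide (msg ≠ "__DEFAULT_MESSAGE")) := by
        simp [List.filter_append]
      rw [List.reverse_append, List.reverse_singleton, List.singleton_append,
        List.find?_cons_of_neg (by simp), ← ih, hfil]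
      by_cases hms : ms = []
      · subst hms; simp [PySem.List.pyGet?_neg_one]
      · rw [if_neg (by simp), if_neg hms]
        by_cases hnd : ms.filter (fun msg => decide (msg ≠ "__DEFAULT_MESSAGE")) = []
        · rw [if_neg (not_not_intro hnd), if_neg (not_not_intro hnd),
            PySem.List.pyGet?_neg_one_append_singleton, PySem.List.pyGet?_neg_one,
            List.getLast?_eq_some_getLast hms]
          have := List.filter_eq_nil_iff.mp hnd (ms.getLast hms) (List.getLast_mem hms)
          simp at this
          simp [this]
        · rw [if_pos hnd, if_pos hnd]
    · have hfil : (ms ++ [m]).filter (fun msg => decide (msg ≠ "__DEFAULT_MESSAGE"))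
          = ms.filter (fun msg => decide (msg ≠ "__DEFAULT_MESSAGE")) ++ [m] := by
        simp [List.filter_append, hm]
      rw [List.reverse_append, List.reverse_singleton, List.singleton_append,
        List.find?_cons_of_pos (by simp [hm]), hfil, if_neg (by simp),
        if_pos (by simp), PySem.List.pyGet?_neg_one_append_singleton]
      simp

-- ===== VERDICT (by name: the statement is the Claim_ definition above) =====
theorem render_violation_py_spec : Claim_equal_render_violation_py := by
  intro violation _
  unfold Spec_render_violation_py render_violation_py render_violation_py_alt
  simp only [rvFoldl_eq_filterMap, List.nil_append, rvAltLoop_eq_find, List.filterMap_reverse]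
  exact rvPost_eq _
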